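-- pv_equiv track=rewrite | github.com/hanruihua/ir-sim | irsim/gui/keyboard_control.py | _format_grid_table
-- ===== SOURCE A (Python) =====
-- from typing import TYPE_CHECKING, Any, Optional
--
-- def _format_grid_table(headers: list[str], rows: list[list[Any]]) -> str:
--     """
--     Render a simple grid table using only standard Python.
--
--     Args:
--         headers: Column headers.
--         rows: Data rows (list of lists).
--
--     Returns:
--         A multi-line string representing the table.
--     """
--
--     def to_str(x: Any) -> str:
--         return str(x)
--
--     cols = len(headers)
--     col_widths = [len(to_str(h)) for h in headers]
--     for row in rows:
--         for i in range(cols):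
--             w = len(to_str(row[i])) if i < len(row) else 0
--             if w > col_widths[i]:
--                 col_widths[i] = w
--
--     def hline(sep: str = "+") -> str:
--         return sep + sep.join(["-" * (w + 2) for w in col_widths]) + sep
--
--     def fmt_row(cells: list[str]) -> str:
--         padded = [to_str(cells[i]).ljust(col_widths[i]) for i in range(cols)]
--         return "| " + " | ".join(padded) + " |"
--
--     lines: list[str] = []
--     lines.append(hline("+"))
--     lines.append(fmt_row(headers))
--     lines.append(hline("+"))
--     for r in rows:
--         # ensure length
--         r_norm = [to_str(r[i]) if i < len(r) else "" for i in range(cols)]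
--         lines.append(fmt_row(r_norm))
--     lines.append(hline("+"))
--     return "\n".join(lines)
-- ===== SOURCE B (Python) =====
-- def _format_grid_table(headers, rows):
--     ncols = len(headers)
--
--     def make_column(j):
--         # one column of the table, top to bottom: separator segment, header cell,
--         # then each data cell -- every cell already padded to this column's width
--         cells = [str(headers[j])] + [(str(r[j]) if j < len(r) else "") for r in rows]
--         w = max(len(c) for c in cells)
--         return ["-" * (w + 2)] + [c.ljust(w) for c in cells]
--
--     columns = [make_column(j) for j in range(ncols)]
--
--     def stripe(i):
--         return [col[i] for col in columns]
--
--     sep = "+" + "+".join(stripe(0)) + "+"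
--
--     def line(i):
--         return "| " + " | ".join(stripe(i)) + " |"
--
--     parts = [sep, line(1), sep] + [line(i) for i in range(2, len(rows) + 2)] + [sep]
--     return "\n".join(parts)
-- ===== Notes on version B (the rewrite author's own statement) =====
-- stated objective: alternative
-- what changed: B is column-major: it builds each column as a self-contained block (separator segment, header, data cells) whose width is computed and applied locally inside the column, then renders lines by transposing (reading stripe i across all columns); A's shared mutable col_widths array and per-row padding pass disappear.
import Mathlib
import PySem

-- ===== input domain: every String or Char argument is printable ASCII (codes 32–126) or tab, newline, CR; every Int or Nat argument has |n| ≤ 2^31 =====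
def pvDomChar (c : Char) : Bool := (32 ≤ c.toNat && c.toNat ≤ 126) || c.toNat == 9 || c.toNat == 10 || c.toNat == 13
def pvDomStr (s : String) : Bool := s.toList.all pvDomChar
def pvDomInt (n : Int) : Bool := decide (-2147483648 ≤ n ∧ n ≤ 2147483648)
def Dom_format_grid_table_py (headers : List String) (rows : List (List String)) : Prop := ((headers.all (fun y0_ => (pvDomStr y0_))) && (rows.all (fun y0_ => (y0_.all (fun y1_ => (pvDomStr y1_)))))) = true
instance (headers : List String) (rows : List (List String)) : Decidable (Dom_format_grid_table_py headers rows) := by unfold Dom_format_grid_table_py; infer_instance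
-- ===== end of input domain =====

-- B rebuilds the table column-major: each column computes its own width locally and is
-- fully padded before rendering, which then just transposes; same value (objective: alternative).

-- s.ljust(w): exact for Nat w (truncated subtraction returns s unchanged when w ≤ len(s))
def pvLjust (cs : List Char) (w : Nat) : List Char := cs ++ List.replicate (w - cs.length) ' '

-- ===== PORT A =====
-- the width-update loop 'for i in range(cols): w = …; if w > col_widths[i]: col_widths[i] = w'
-- (the indices i are always in range of col_widths at the call sites; getD/set are exact there)
def pvA_inner (cols : Nat) (row : List String) (cw : List Nat) : List Nat :=
  (List.range cols).foldl (fun cw i =>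
    let w := if i < row.length then (row.getD i "").toList.length else 0
    if w > cw.getD i 0 then cw.set i w else cw) cw

def pvA_widths (headers : List String) (rows : List (List String)) : List Nat :=
  rows.foldl (fun cw row => pvA_inner headers.length row cw)
    (headers.map (fun h => h.toList.length))

-- hline("+") = "+" + "+".join(["-" * (w + 2) for w in col_widths]) + "+"
def pvA_hline (cw : List Nat) : List Char :=
  ['+'] ++ PySem.Chars.join ['+'] (cw.map (fun w => List.replicate (w + 2) '-')) ++ ['+']

-- fmt_row: cells[i] and col_widths[i] are always in range at the call sites
def pvA_fmtRow (cols : Nat) (cw : List Nat) (cells : List String) : List Char :=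
  "| ".toList
    ++ PySem.Chars.join " | ".toList
        ((List.range cols).map (fun i => pvLjust (cells.getD i "").toList (cw.getD i 0)))
    ++ " |".toList

def format_grid_table_py (headers : List String) (rows : List (List String)) : String :=
  let cols := headers.length
  let cw := pvA_widths headers rows
  let lines := [pvA_hline cw, pvA_fmtRow cols cw headers, pvA_hline cw]
    ++ rows.map (fun r =>
        pvA_fmtRow cols cw ((List.range cols).map (fun i => if i < r.length then r.getD i "" else "")))
    ++ [pvA_hline cw]
  String.ofList (PySem.Chars.join ['\n'] lines)

-- ===== PORT B =====
-- make_column(j): the whole column top to bottom, every cell already padded to this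
-- column's own width w (Python's max over the nonempty cells list = foldl max 0 on Nat lengths)
def pvB_column (headers : List String) (rows : List (List String)) (j : Nat) : List (List Char) :=
  let cells : List (List Char) :=
    (headers.getD j "").toList
      :: rows.map (fun r => if j < r.length then (r.getD j "").toList else [])
  let w := cells.foldl (fun m c => max m c.length) 0
  List.replicate (w + 2) '-' :: cells.map (fun c => pvLjust c w)

-- stripe(i) = [col[i] for col in columns] (i is always in range at the call sites)
def pvB_stripe (columns : List (List (List Char))) (i : Nat) : List (List Char) :=
  columns.map (fun col => col.getD i [])

def format_grid_table_py_alt (headers : List String) (rows : List (List String)) : String :=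
  let columns := (List.range headers.length).map (pvB_column headers rows)
  let sep := ['+'] ++ PySem.Chars.join ['+'] (pvB_stripe columns 0) ++ ['+']
  let line := fun i =>
    "| ".toList ++ PySem.Chars.join " | ".toList (pvB_stripe columns i) ++ " |".toList
  let parts := [sep, line 1, sep] ++ (List.range' 2 rows.length).map line ++ [sep]
  String.ofList (PySem.Chars.join ['\n'] parts)

-- ===== PRECONDITION & SPEC =====
def Spec_format_grid_table_py (headers : List String) (rows : List (List String)) (out : String) : Prop := out = format_grid_table_py_alt headers rows
instance (headers : List String) (rows : List (List String)) (out : String) : Decidable (Spec_format_grid_table_py headers rows out) := by unfold Spec_format_grid_table_py; infer_instance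

-- ===== CLAIM =====
def Claim_equal_format_grid_table_py : Prop := ∀ (headers : List String) (rows : List (List String)), Dom_format_grid_table_py headers rows → Spec_format_grid_table_py headers rows (format_grid_table_py headers rows)

-- ===== LEMMAS AND PROOFS =====

-- the width A's loop assigns to cell i of a raw data row
def pvRowW (row : List String) (i : Nat) : Nat :=
  if i < row.length then (row.getD i "").toList.length else 0

theorem pvFoldW_length (f : Nat → Nat) (ℓ : List Nat) (cw : List Nat) :
    (ℓ.foldl (fun cw i => if f i > cw.getD i 0 then cw.set i (f i) else cw) cw).length = cw.length := by
  induction ℓ generalizing cw with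
  | nil => rfl
  | cons j ℓ ih =>
    simp only [List.foldl_cons]
    split
    · rw [ih, List.length_set]
    · exact ih cw

theorem pvFoldW_getD (f : Nat → Nat) (ℓ : List Nat) (cw : List Nat) (i : Nat)
    (hall : ∀ j ∈ ℓ, j < cw.length) :
    (ℓ.foldl (fun cw i => if f i > cw.getD i 0 then cw.set i (f i) else cw) cw).getD i 0
      = if i ∈ ℓ then max (cw.getD i 0) (f i) else cw.getD i 0 := by
  induction ℓ generalizing cw with
  | nil => simp
  | cons j ℓ ih =>
    have hj : j < cw.length := hall j (by simp)
    have hstep : ∀ k, (if f j > cw.getD j 0 then cw.set j (f j) else cw).getD k 0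
        = if k = j then max (cw.getD k 0) (f j) else cw.getD k 0 := by
      intro k
      by_cases hkj : k = j
      · subst hkj
        by_cases h : f k > cw.getD k 0
        · rw [if_pos h, if_pos rfl, List.getD_eq_getElem _ _ (by simpa using hj),
              List.getElem_set_self]
          exact (Nat.max_eq_right (le_of_lt h)).symm
        · rw [if_neg h, if_pos rfl]
          exact (Nat.max_eq_left (Nat.le_of_not_lt h)).symm
      · have hne : (cw.set j (f j)).getD k 0 = cw.getD k 0 := by
          simp only [List.getD]
          rw [List.getElem?_set_ne (fun h => hkj h.symm)]
        by_cases h : f j > cw.getD j 0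
        · rw [if_pos h, if_neg hkj, hne]
        · rw [if_neg h, if_neg hkj]
    have hall' : ∀ k ∈ ℓ, k < (if f j > cw.getD j 0 then cw.set j (f j) else cw).length := by
      intro k hk
      split
      · rw [List.length_set]; exact hall k (List.mem_cons_of_mem _ hk)
      · exact hall k (List.mem_cons_of_mem _ hk)
    simp only [List.foldl_cons]
    rw [ih _ hall', hstep i]
    simp only [List.mem_cons]
    by_cases hij : i = j
    · subst hij
      by_cases hmem : i ∈ ℓ
      · rw [if_pos hmem, if_pos rfl, if_pos (Or.inr hmem)]
        omega
      · rw [if_neg hmem, if_pos rfl, if_pos (Or.inl rfl)]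
    · by_cases hmem : i ∈ ℓ
      · rw [if_pos hmem, if_neg hij, if_pos (Or.inr hmem)]
      · rw [if_neg hmem, if_neg hij, if_neg (by tauto)]

theorem pvA_inner_length (cols : Nat) (row : List String) (cw : List Nat) :
    (pvA_inner cols row cw).length = cw.length := pvFoldW_length _ _ _

theorem pvA_inner_getD (cols : Nat) (row : List String) (cw : List Nat)
    (hlen : cw.length = cols) (i : Nat) (hi : i < cols) :
    (pvA_inner cols row cw).getD i 0 = max (cw.getD i 0) (pvRowW row i) := by
  unfold pvA_inner
  have h := pvFoldW_getD (pvRowW row) (List.range cols) cw i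
    (by intro j hj; rw [hlen]; exact List.mem_range.mp hj)
  simp only [pvRowW] at h
  rw [h, if_pos (List.mem_range.mpr hi)]
  rfl

theorem pvA_widths_core (cols : Nat) (rows : List (List String)) (cw : List Nat)
    (hlen : cw.length = cols) (i : Nat) (hi : i < cols) :
    ((rows.foldl (fun cw row => pvA_inner cols row cw) cw).getD i 0)
      = rows.foldl (fun m r => max m (pvRowW r i)) (cw.getD i 0) := by
  induction rows generalizing cw with
  | nil => rfl
  | cons r rs ih =>
    simp only [List.foldl_cons]
    rw [ih _ (by rw [pvA_inner_length, hlen]), pvA_inner_getD cols r cw hlen i hi]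

theorem pvA_widths_core_length (cols : Nat) (rows : List (List String)) (cw : List Nat) :
    (rows.foldl (fun cw row => pvA_inner cols row cw) cw).length = cw.length := by
  induction rows generalizing cw with
  | nil => rfl
  | cons r rs ih => simp only [List.foldl_cons]; rw [ih, pvA_inner_length]

theorem pvA_widths_length (headers : List String) (rows : List (List String)) :
    (pvA_widths headers rows).length = headers.length := by
  unfold pvA_widths; rw [pvA_widths_core_length]; simp

-- B's local column width = A's col_widths[j]
theorem pv_col_w (headers : List String) (rows : List (List String)) (j : Nat)
    (hj : j < headers.length) :
    (((headers.getD j "").toList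
        :: rows.map (fun r => if j < r.length then (r.getD j "").toList else [])).foldl
      (fun m c => max m c.length) 0)
      = (pvA_widths headers rows).getD j 0 := by
  unfold pvA_widths
  rw [pvA_widths_core headers.length rows _ (by simp) j hj]
  have hinit : (headers.map (fun h => h.toList.length)).getD j 0 = (headers.getD j "").toList.length := by
    rw [List.getD_eq_getElem _ 0 (by simpa using hj), List.getD_eq_getElem _ _ hj]
    simp
  rw [hinit]
  simp only [List.foldl_cons, List.foldl_map, Nat.zero_max]
  congr 1
  funext m r
  unfold pvRowW
  split <;> simp

-- B's column j, spelled out with A's width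
theorem pv_column_eq (headers : List String) (rows : List (List String)) (j : Nat)
    (hj : j < headers.length) :
    pvB_column headers rows j
      = List.replicate ((pvA_widths headers rows).getD j 0 + 2) '-'
        :: pvLjust (headers.getD j "").toList ((pvA_widths headers rows).getD j 0)
        :: rows.map (fun r =>
            pvLjust (if j < r.length then (r.getD j "").toList else [])
              ((pvA_widths headers rows).getD j 0)) := by
  simp only [pvB_column]
  rw [pv_col_w headers rows j hj]
  simp [List.map_cons]

-- a list of length n, mapped, re-read through range n
theorem pv_map_range {α β : Type} (l : List α) (d : α) (f : α → β) :
    l.map f = (List.range l.length).map (fun j => f (l.getD j d)) := by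
  apply List.ext_getElem
  · simp
  intro i h1 h2
  simp only [List.getElem_map, List.getElem_range]
  rw [List.getD_eq_getElem _ _ (by simpa using h1)]

-- ===== VERDICT =====
theorem format_grid_table_py_spec : Claim_equal_format_grid_table_py := by
  intro headers rows _
  unfold Spec_format_grid_table_py
  simp only [format_grid_table_py, format_grid_table_py_alt]
  set cw := pvA_widths headers rows with hcw
  have hstripe : ∀ i, pvB_stripe ((List.range headers.length).map (pvB_column headers rows)) i
      = (List.range headers.length).map (fun j => (pvB_column headers rows j).getD i []) := by
    intro i; unfold pvB_stripe; rw [List.map_map]; rfl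
  have hsepmap : (List.range headers.length).map (fun j => (pvB_column headers rows j).getD 0 [])
      = cw.map (fun w => List.replicate (w + 2) '-') := by
    rw [pv_map_range cw 0 (fun w => List.replicate (w + 2) '-'), pvA_widths_length]
    apply List.map_congr_left
    intro j hj
    rw [pv_column_eq headers rows j (List.mem_range.mp hj)]
    rfl
  have hsep : ['+'] ++ PySem.Chars.join ['+']
        (pvB_stripe ((List.range headers.length).map (pvB_column headers rows)) 0) ++ ['+']
      = pvA_hline cw := by
    rw [hstripe, hsepmap]; rfl
  have hhead : "| ".toList ++ PySem.Chars.join " | ".toList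
        (pvB_stripe ((List.range headers.length).map (pvB_column headers rows)) 1) ++ " |".toList
      = pvA_fmtRow headers.length cw headers := by
    rw [hstripe]
    unfold pvA_fmtRow
    congr 3
    apply List.map_congr_left
    intro j hj
    rw [pv_column_eq headers rows j (List.mem_range.mp hj)]
    rfl
  have hdata : ∀ k, k < rows.length →
      "| ".toList ++ PySem.Chars.join " | ".toList
          (pvB_stripe ((List.range headers.length).map (pvB_column headers rows)) (k + 2)) ++ " |".toList
        = pvA_fmtRow headers.length cw
            ((List.range headers.length).map (fun i => if i < (rows.getD k []).length then (rows.getD k []).getD i "" else "")) := by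
    intro k hk
    rw [hstripe]
    unfold pvA_fmtRow
    congr 3
    apply List.map_congr_left
    intro j hj
    have hj' := List.mem_range.mp hj
    rw [pv_column_eq headers rows j hj']
    show ((rows.map (fun r =>
        pvLjust (if j < r.length then (r.getD j "").toList else []) (cw.getD j 0))).getD k [])
      = pvLjust (((List.range headers.length).map
          (fun i => if i < (rows.getD k []).length then (rows.getD k []).getD i "" else "")).getD j "").toList
          (cw.getD j 0)
    rw [List.getD_eq_getElem _ _ (by simpa using hk),
        List.getD_eq_getElem _ "" (by simpa using hj')]
    simp only [List.getElem_map, List.getElem_range]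
    rw [List.getD_eq_getElem rows [] hk]
    congr 1
    split <;> simp
  refine congrArg String.ofList (congrArg (PySem.Chars.join ['\n']) ?_)
  refine congrArg₂ (· ++ ·) (congrArg₂ (· ++ ·) ?_ ?_) ?_
  · rw [hsep, hhead]
  · apply List.ext_getElem
    · simp
    intro k h1 h2
    have hk : k < rows.length := by simpa using h2
    simp only [List.getElem_map, List.getElem_range']
    rw [show 2 + 1 * k = k + 2 by omega, hdata k hk, List.getD_eq_getElem rows [] hk]
  · rw [hsep]
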